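-- pv_equiv track=rewrite | github.com/aveesha-teladoc/education-service-sync-script | aem_to_normalized.py | infer_type_label
-- ===== SOURCE A (Python) =====
-- CONTENT_TYPE_ID = {'Curriculum':1,'Unit':2,'Lesson':3,'Page':4,'Answer':5,'Asset':6,'Term':7,'Tag':8}
--
-- PATH_TOKEN_TO_TYPE_ID = {'curriculum':1,'unit':2,'lesson':3,'question-answer':5,'term':7,'tag':8}
--
-- LABEL_MAP = {
--     'iconPage':303,'tipPage':304,'imagePage':305,'questionPage':310,
--     'lessonTableOfContentsPage':311,'lessonIntroPage':313,'curriculumIntroPage':314,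
-- }
--
-- def infer_type_label(path: str):
--     if not path:
--         return None, None
--     parts = path.strip('/').split('/')
--     ctype, clabel = None, None
--     for seg in parts:
--         if seg in LABEL_MAP:
--             return CONTENT_TYPE_ID['Page'], LABEL_MAP[seg]
--         if seg in PATH_TOKEN_TO_TYPE_ID:
--             ctype = PATH_TOKEN_TO_TYPE_ID[seg]
--     return ctype, clabel
-- ===== SOURCE B (Python) =====
-- CONTENT_TYPE_ID = {'Curriculum':1,'Unit':2,'Lesson':3,'Page':4,'Answer':5,'Asset':6,'Term':7,'Tag':8}
--
-- PATH_TOKEN_TO_TYPE_ID = {'curriculum':1,'unit':2,'lesson':3,'question-answer':5,'term':7,'tag':8}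
--
-- LABEL_MAP = {
--     'iconPage':303,'tipPage':304,'imagePage':305,'questionPage':310,
--     'lessonTableOfContentsPage':311,'lessonIntroPage':313,'curriculumIntroPage':314,
-- }
--
-- def infer_type_label(path: str):
--     if not path:
--         return None, None
--     parts = path.strip('/').split('/')
--     # pass 1: first label segment wins as a Page
--     for seg in parts:
--         if seg in LABEL_MAP:
--             return CONTENT_TYPE_ID['Page'], LABEL_MAP[seg]
--     # pass 2: last type token, found by scanning backwards with early return
--     for seg in reversed(parts):
--         if seg in PATH_TOKEN_TO_TYPE_ID:
--             return PATH_TOKEN_TO_TYPE_ID[seg], None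
--     return None, None
-- ===== Notes on version B (the rewrite author's own statement) =====
-- stated objective: simpler
-- what changed: Replaces the single pass with a mutable last-seen type accumulator by two accumulator-free passes: a forward scan returning on the first label segment, then a backward scan returning on the first type token (= the last one in path order).
import Mathlib
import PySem

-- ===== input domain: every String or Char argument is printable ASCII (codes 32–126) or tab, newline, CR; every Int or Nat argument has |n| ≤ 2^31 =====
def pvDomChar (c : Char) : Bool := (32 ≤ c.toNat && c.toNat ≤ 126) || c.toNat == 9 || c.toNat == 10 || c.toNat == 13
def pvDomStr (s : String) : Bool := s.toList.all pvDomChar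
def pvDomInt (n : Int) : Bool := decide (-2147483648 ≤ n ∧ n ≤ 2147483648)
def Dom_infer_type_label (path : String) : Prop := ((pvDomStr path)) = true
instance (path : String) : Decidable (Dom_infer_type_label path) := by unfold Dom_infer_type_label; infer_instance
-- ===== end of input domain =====

-- B replaces A's single pass with a last-seen accumulator by two accumulator-free passes
-- (first label forwards, first type token backwards); objective: simpler.

-- ===== PORT A =====
def pathTokenToTypeId : PySem.Dict String Int :=
  PySem.Dict.ofList [("curriculum", 1), ("unit", 2), ("lesson", 3), ("question-answer", 5), ("term", 7), ("tag", 8)]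

def labelMap : PySem.Dict String Int :=
  PySem.Dict.ofList [("iconPage", 303), ("tipPage", 304), ("imagePage", 305), ("questionPage", 310),
    ("lessonTableOfContentsPage", 311), ("lessonIntroPage", 313), ("curriculumIntroPage", 314)]

-- the for-loop of A: accumulator ctype, early return on a label segment
def inferLoopA : List String → Option Int → Option Int × Option Int
  | [], ctype => (ctype, none)
  | seg :: rest, ctype =>
    match labelMap.get? seg with
    | some v => (some 4, some v)
    | none =>
      match pathTokenToTypeId.get? seg with
      | some t => inferLoopA rest (some t)
      | none => inferLoopA rest ctype

def infer_type_label (path : String) : Option Int × Option Int :=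
  if path = "" then (none, none)
  else
    let parts := (PySem.Str.split? (PySem.Str.stripChars path "/") "/").getD []
    inferLoopA parts none

-- ===== PORT B =====
-- first value of d found along the list
def findFirst (d : PySem.Dict String Int) : List String → Option Int
  | [] => none
  | seg :: rest =>
    match d.get? seg with
    | some v => some v
    | none => findFirst d rest

def infer_type_label_alt (path : String) : Option Int × Option Int :=
  if path = "" then (none, none)
  else
    let parts := (PySem.Str.split? (PySem.Str.stripChars path "/") "/").getD []
    match findFirst labelMap parts with
    | some v => (some 4, some v)
    | none =>
      match findFirst pathTokenToTypeId parts.reverse with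
      | some t => (some t, none)
      | none => (none, none)

-- ===== PRECONDITION & SPEC =====
def Spec_infer_type_label (path : String) (out : Option Int × Option Int) : Prop := out = infer_type_label_alt path
instance (path : String) (out : Option Int × Option Int) : Decidable (Spec_infer_type_label path out) := by unfold Spec_infer_type_label; infer_instance

-- ===== CLAIM (what is proved, stated in full; the proofs are below) =====
def Claim_equal_infer_type_label : Prop := ∀ (path : String), Dom_infer_type_label path → Spec_infer_type_label path (infer_type_label path)

-- ===== LEMMAS AND PROOFS =====

theorem findFirst_append (d : PySem.Dict String Int) (xs ys : List String) :
    findFirst d (xs ++ ys) = (findFirst d xs).or (findFirst d ys) := by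
  induction xs with
  | nil => simp [findFirst]
  | cons x xs ih =>
    simp only [List.cons_append, findFirst]
    cases d.get? x <;> simp [ih]

theorem inferLoopA_eq (parts : List String) (ctype : Option Int) :
    inferLoopA parts ctype =
      match findFirst labelMap parts with
      | some v => (some 4, some v)
      | none =>
        match findFirst pathTokenToTypeId parts.reverse with
        | some t => (some t, none)
        | none => (ctype, none) := by
  induction parts generalizing ctype with
  | nil => simp [inferLoopA, findFirst]
  | cons seg rest ih =>
    cases hl : labelMap.get? seg with
    | some v => simp [inferLoopA, findFirst, hl]
    | none =>
      cases ht : pathTokenToTypeId.get? seg with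
      | some t =>
        simp only [inferLoopA, findFirst, hl, ht, List.reverse_cons, findFirst_append, ih]
        cases findFirst labelMap rest with
        | some v => rfl
        | none =>
          cases findFirst pathTokenToTypeId rest.reverse <;> simp [Option.or]
      | none =>
        simp only [inferLoopA, findFirst, hl, ht, List.reverse_cons, findFirst_append, ih]
        cases findFirst labelMap rest with
        | some v => rfl
        | none =>
          cases findFirst pathTokenToTypeId rest.reverse <;> simp [Option.or]

-- ===== VERDICT (by name: the statement is the Claim_ definition above) =====
theorem infer_type_label_spec : Claim_equal_infer_type_label := by
  intro path _
  unfold Spec_infer_type_label infer_type_label infer_type_label_alt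
  by_cases h : path = ""
  · simp [h]
  · simp only [h, if_false]
    rw [inferLoopA_eq]
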